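-- pv_equiv track=rewrite | github.com/alanlukee/Code-Vault | fiboTriangle.py | generate_fibonacci_triangle
-- ===== SOURCE A (Python) =====
-- def generate_fibonacci_triangle(rows):
--     triangle = []
--     a, b = 0, 1
--     for i in range(1,rows+1,1):
--         row = []
--         for j in range(1,i+1,1):
--             row.append(a)
--             a, b = b, a + b
--         triangle.append(row)
--     return triangle
-- ===== SOURCE B (Python) =====
-- def generate_fibonacci_triangle(rows):
--     # Pass 1: generate all needed Fibonacci numbers flat.
--     total = rows * (rows + 1) // 2 if rows > 0 else 0
--     flat = []
--     a, b = 0, 1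
--     for _ in range(total):
--         flat.append(a)
--         a, b = b, a + b
--     # Pass 2: carve the flat list into rows of growing length.
--     triangle = []
--     offset = 0
--     for i in range(1, rows + 1):
--         triangle.append(flat[offset:offset + i])
--         offset += i
--     return triangle
-- ===== Notes on version B (the rewrite author's own statement) =====
-- stated objective: alternative
-- what changed: A interleaves Fibonacci generation with row construction in nested loops sharing mutable state; B first generates the whole needed Fibonacci prefix as one flat list in a single loop, then in a separate pass slices that flat list into rows of growing length.
import Mathlib
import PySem

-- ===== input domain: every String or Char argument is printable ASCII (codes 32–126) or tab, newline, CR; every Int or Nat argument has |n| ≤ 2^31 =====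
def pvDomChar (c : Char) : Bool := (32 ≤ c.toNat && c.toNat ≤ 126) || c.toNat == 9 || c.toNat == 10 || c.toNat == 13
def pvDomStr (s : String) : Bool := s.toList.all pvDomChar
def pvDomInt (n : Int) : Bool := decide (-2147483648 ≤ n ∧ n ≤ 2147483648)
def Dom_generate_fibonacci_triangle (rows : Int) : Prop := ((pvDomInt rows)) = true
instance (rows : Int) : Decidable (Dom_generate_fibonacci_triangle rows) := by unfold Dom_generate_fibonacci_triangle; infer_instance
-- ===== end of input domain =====

-- B separates A's interleaved nested loops into two passes: generate a flat Fibonacci list, then slice it into rows (alternative decomposition; same cost).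


-- ===== PORT A =====
def generate_fibonacci_triangle (rows : Int) : List (List Int) :=
  let st := (PySem.List.pyRange 1 (rows + 1) 1).foldl
    (fun (st : List (List Int) × Int × Int) i =>
      let inner := (PySem.List.pyRange 1 (i + 1) 1).foldl
        (fun (st2 : List Int × Int × Int) _ =>
          (st2.1 ++ [st2.2.1], st2.2.2, st2.2.1 + st2.2.2)) ([], st.2)
      (st.1 ++ [inner.1], inner.2)) ([], 0, 1)
  st.1

-- ===== PORT B =====
def generate_fibonacci_triangle_alt (rows : Int) : List (List Int) :=
  let total := if 0 < rows then PySem.Int.floordiv (rows * (rows + 1)) 2 else 0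
  let fl := (PySem.List.pyRange 0 total 1).foldl
    (fun (st : List Int × Int × Int) _ =>
      (st.1 ++ [st.2.1], st.2.2, st.2.1 + st.2.2)) ([], 0, 1)
  let flat := fl.1
  let res := (PySem.List.pyRange 1 (rows + 1) 1).foldl
    (fun (st : List (List Int) × Int) i =>
      (st.1 ++ [PySem.List.slice flat (some st.2) (some (st.2 + i))], st.2 + i))
    ([], 0)
  res.1

-- ===== PRECONDITION & SPEC =====
def Spec_generate_fibonacci_triangle (rows : Int) (out : List (List Int)) : Prop := out = generate_fibonacci_triangle_alt rows
instance (rows : Int) (out : List (List Int)) : Decidable (Spec_generate_fibonacci_triangle rows out) := by unfold Spec_generate_fibonacci_triangle; infer_instance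

-- ===== CLAIM (what is proved, stated in full; the proofs are below) =====
def Claim_equal_generate_fibonacci_triangle : Prop := ∀ (rows : Int), Dom_generate_fibonacci_triangle rows → Spec_generate_fibonacci_triangle rows (generate_fibonacci_triangle rows)

-- ===== LEMMAS AND PROOFS =====

-- the list [a, b, a+b, ...] of n consecutive Fibonacci numbers starting from state (a, b)
def fibRow (a b : Int) : Nat → List Int
  | 0 => []
  | n + 1 => a :: fibRow b (a + b) n

-- the Fibonacci state after n steps from (a, b)
def fibAdv (a b : Int) : Nat → Int × Int
  | 0 => (a, b)
  | n + 1 => fibAdv b (a + b) n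

-- canonical triangle: n rows of lengths s, s+1, ..., from state (a, b)
def triFrom (a b : Int) (s : Nat) : Nat → List (List Int)
  | 0 => []
  | n + 1 => fibRow a b s :: triFrom (fibAdv a b s).1 (fibAdv a b s).2 (s + 1) n

-- total length of n rows of sizes s, s+1, ..., s+n-1
def sumLens (s : Nat) : Nat → Nat
  | 0 => 0
  | n + 1 => s + sumLens (s + 1) n

theorem fibAdv_add (a b : Int) (m n : Nat) :
    fibAdv a b (m + n) = fibAdv (fibAdv a b m).1 (fibAdv a b m).2 n := by
  induction m generalizing a b with
  | zero => simp [fibAdv]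
  | succ k ih => simpa [fibAdv, Nat.succ_add] using ih b (a + b)

theorem sumLens_succ (s n : Nat) : sumLens s (n + 1) = sumLens s n + (s + n) := by
  induction n generalizing s with
  | zero => simp [sumLens]
  | succ k ihn => rw [sumLens, ihn (s + 1), sumLens]; omega

theorem fibRow_take (a b : Int) (m n : Nat) (h : n ≤ m) :
    (fibRow a b m).take n = fibRow a b n := by
  induction n generalizing a b m with
  | zero => simp [fibRow]
  | succ k ih =>
    cases m with
    | zero => omega
    | succ m' => simp [fibRow, ih b (a + b) m' (by omega)]

theorem fibRow_drop (a b : Int) (m n : Nat) :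
    (fibRow a b m).drop n = fibRow (fibAdv a b n).1 (fibAdv a b n).2 (m - n) := by
  induction n generalizing a b m with
  | zero => simp [fibAdv]
  | succ k ih =>
    cases m with
    | zero => simp [fibRow]
    | succ m' => simpa [fibRow, fibAdv] using ih b (a + b) m'

-- the append-loop shared by A's inner loop and B's flat loop
theorem innerA_loop (l : List Int) (row : List Int) (a b : Int) :
    l.foldl (fun (st2 : List Int × Int × Int) _ =>
        (st2.1 ++ [st2.2.1], st2.2.2, st2.2.1 + st2.2.2)) (row, a, b)
      = (row ++ fibRow a b l.length, fibAdv a b l.length) := by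
  induction l generalizing row a b with
  | nil => simp [fibRow, fibAdv]
  | cons x xs ih => simp [fibRow, fibAdv, ih (row ++ [a]) b (a + b)]

-- A's outer loop over [s, s+1, ..., s+n-1]
theorem A_loop (n : Nat) : ∀ (s : Nat) (tri : List (List Int)) (a b : Int),
    ((List.range n).map (fun k => ((s + k : Nat) : Int))).foldl
      (fun (st : List (List Int) × Int × Int) i =>
        (st.1 ++ [((PySem.List.pyRange 1 (i + 1) 1).foldl
            (fun (st2 : List Int × Int × Int) _ =>
              (st2.1 ++ [st2.2.1], st2.2.2, st2.2.1 + st2.2.2)) ([], st.2)).1],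
         ((PySem.List.pyRange 1 (i + 1) 1).foldl
            (fun (st2 : List Int × Int × Int) _ =>
              (st2.1 ++ [st2.2.1], st2.2.2, st2.2.1 + st2.2.2)) ([], st.2)).2)) (tri, a, b)
      = (tri ++ triFrom a b s n, fibAdv a b (sumLens s n)) := by
  induction n with
  | zero => intro s tri a b; simp [triFrom, sumLens, fibAdv]
  | succ m ih =>
    intro s tri a b
    rw [List.range_succ_eq_map, List.map_cons, List.map_map, List.foldl_cons]
    have hmap : ((List.range m).map ((fun k => ((s + k : Nat) : Int)) ∘ (· + 1)))
        = (List.range m).map (fun k => (((s + 1) + k : Nat) : Int)) := by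
      apply List.map_congr_left; intro k _; simp [Function.comp]; omega
    have hlen : (PySem.List.pyRange 1 (((s + 0 : Nat) : Int) + 1) 1).length = s := by
      rw [PySem.List.length_pyRange_one]; omega
    have hinner := innerA_loop (PySem.List.pyRange 1 (((s + 0 : Nat) : Int) + 1) 1) [] a b
    rw [hlen] at hinner
    simp only [hinner, List.nil_append, hmap]
    rw [ih (s + 1) (tri ++ [fibRow a b s]) (fibAdv a b s).1 (fibAdv a b s).2]
    simp only [Prod.mk.injEq]
    constructor
    · simp [triFrom]
    · rw [sumLens, fibAdv_add]

-- slicing the flat Fibonacci list gives the Fibonacci row at that offset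
theorem slice_fibRow (N o s : Nat) (h : o + s ≤ N) (a b : Int) :
    PySem.List.slice (fibRow a b N) (some ((o : Nat) : Int)) (some (((o : Nat) : Int) + ((s : Nat) : Int)))
      = fibRow (fibAdv a b o).1 (fibAdv a b o).2 s := by
  rw [PySem.List.slice_natCast_add, fibRow_drop]
  exact fibRow_take _ _ _ _ (by omega)

-- B's slicing loop over [s, s+1, ..., s+n-1]
theorem B_loop (N : Nat) (a0 b0 : Int) (n : Nat) : ∀ (s o : Nat) (tri : List (List Int)),
    o + sumLens s n ≤ N →
    ((List.range n).map (fun k => ((s + k : Nat) : Int))).foldl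
      (fun (st : List (List Int) × Int) i =>
        (st.1 ++ [PySem.List.slice (fibRow a0 b0 N) (some st.2) (some (st.2 + i))], st.2 + i))
      (tri, ((o : Nat) : Int))
      = (tri ++ triFrom (fibAdv a0 b0 o).1 (fibAdv a0 b0 o).2 s n, (((o + sumLens s n : Nat)) : Int)) := by
  induction n with
  | zero => intro s o tri _; simp [triFrom, sumLens]
  | succ m ih =>
    intro s o tri h
    rw [List.range_succ_eq_map, List.map_cons, List.map_map, List.foldl_cons]
    have hmap : ((List.range m).map ((fun k => ((s + k : Nat) : Int)) ∘ (· + 1)))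
        = (List.range m).map (fun k => (((s + 1) + k : Nat) : Int)) := by
      apply List.map_congr_left; intro k _; simp [Function.comp]; omega
    have hsum : sumLens s (m + 1) = s + sumLens (s + 1) m := rfl
    have hle : o + s ≤ N := by rw [hsum] at h; omega
    have hcast : ((o : Nat) : Int) + ((s + 0 : Nat) : Int) = (((o + s : Nat)) : Int) := by
      push_cast; ring
    have hslice : PySem.List.slice (fibRow a0 b0 N) (some ((o : Nat) : Int))
        (some ((((o + s : Nat)) : Int)))
        = fibRow (fibAdv a0 b0 o).1 (fibAdv a0 b0 o).2 s := by
      have h2 := slice_fibRow N o s hle a0 b0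
      rwa [show ((o : Nat) : Int) + ((s : Nat) : Int) = (((o + s : Nat)) : Int) by push_cast; ring] at h2
    rw [hmap, hcast, hslice]
    rw [ih (s + 1) (o + s) _ (by rw [hsum] at h; omega)]
    simp only [Prod.mk.injEq]
    constructor
    · simp [triFrom, fibAdv_add]
    · congr 1; rw [hsum]; omega

theorem pyRange_one_as_range (r : Int) :
    PySem.List.pyRange 1 (r + 1) 1 = (List.range r.toNat).map (fun k => ((1 + k : Nat) : Int)) := by
  rw [PySem.List.pyRange_one]
  have h1 : (r + 1 - 1).toNat = r.toNat := by omega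
  rw [h1]
  apply List.map_congr_left; intro k _; push_cast; ring

theorem total_eq_nat (m : Nat) : (((m : Int) * ((m : Int) + 1)) / 2).toNat = sumLens 1 m := by
  induction m with
  | zero => simp [sumLens]
  | succ k ih =>
    rw [sumLens_succ]
    have h1 : ((k : Int) + 1) * (((k : Int) + 1) + 1) = (k : Int) * ((k : Int) + 1) + ((k : Int) + 1) * 2 := by
      ring
    push_cast
    rw [h1, Int.add_mul_ediv_right _ _ (by omega : (2:Int) ≠ 0)]
    have hnn : 0 ≤ (k : Int) * ((k : Int) + 1) / 2 := by positivity
    omega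

theorem total_eq (r : Int) (h : 0 ≤ r) :
    (PySem.Int.floordiv (r * (r + 1)) 2).toNat = sumLens 1 r.toNat := by
  rw [PySem.Int.floordiv_eq_ediv_of_pos (by omega)]
  obtain ⟨m, rfl⟩ : ∃ m : Nat, r = (m : Int) := ⟨r.toNat, by omega⟩
  simpa using total_eq_nat m

-- ===== VERDICT (by name: the statement is the Claim_ definition above) =====
theorem generate_fibonacci_triangle_spec : Claim_equal_generate_fibonacci_triangle := by
  intro rows _
  unfold Spec_generate_fibonacci_triangle generate_fibonacci_triangle generate_fibonacci_triangle_alt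
  by_cases hr : 0 ≤ rows
  case neg =>
    have hempty : PySem.List.pyRange 1 (rows + 1) 1 = [] := by
      rw [PySem.List.pyRange_one]
      have h0 : (rows + 1 - 1).toNat = 0 := by omega
      rw [h0]; simp
    have hneg : ¬ (0 < rows) := by omega
    simp [hempty, hneg]
  case pos =>
    have hif : (if 0 < rows then PySem.Int.floordiv (rows * (rows + 1)) 2 else 0)
        = PySem.Int.floordiv (rows * (rows + 1)) 2 := by
      by_cases h : 0 < rows
      · simp [h]
      · have h0 : rows = 0 := by omega
        subst h0; decide
    simp only [hif]
    have hA := A_loop rows.toNat 1 [] 0 1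
    have htotnn : 0 ≤ PySem.Int.floordiv (rows * (rows + 1)) 2 := by
      rw [PySem.Int.floordiv_eq_ediv_of_pos (by omega)]
      exact Int.ediv_nonneg (by positivity) (by omega)
    have hflatrange : PySem.List.pyRange 0 (PySem.Int.floordiv (rows * (rows + 1)) 2) 1
        = (List.range (PySem.Int.floordiv (rows * (rows + 1)) 2).toNat).map
            (fun k => ((0 + k : Nat) : Int)) := by
      rw [PySem.List.pyRange_one]
      have h2 : (PySem.Int.floordiv (rows * (rows + 1)) 2 - 0).toNat
          = (PySem.Int.floordiv (rows * (rows + 1)) 2).toNat := by omega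
      rw [h2]
      apply List.map_congr_left; intro k _; push_cast; ring
    have hflat := innerA_loop
      ((List.range (PySem.Int.floordiv (rows * (rows + 1)) 2).toNat).map
        (fun k => ((0 + k : Nat) : Int))) [] 0 1
    simp only [List.length_map, List.length_range] at hflat
    have hB := B_loop (sumLens 1 rows.toNat) 0 1 rows.toNat 1 0 [] (by simp)
    simp only [Nat.cast_zero, Nat.zero_add] at hB
    rw [total_eq rows hr] at hflatrange hflat
    simp only [pyRange_one_as_range rows, hflatrange, hflat, List.nil_append, hA, hB]
    simp [fibAdv]
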